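-- pv_equiv track=rewrite | github.com/marco144803025/AI-mockup-generator | backend/layers/intelligence_layer.py | _extract_tables
-- ===== SOURCE A (Python) =====
-- from typing import Any, Dict, List, Optional, Union, Callable
--
-- def _extract_tables(content: str) -> List[List[List[str]]]:
--     """Extract tables from markdown content"""
--     tables = []
--     lines = content.split('\n')
--     current_table = []
--     in_table = False
--
--     for line in lines:
--         if '|' in line:
--             if not in_table:
--                 in_table = True
--             row = [cell.strip() for cell in line.split('|')[1:-1]]
--             current_table.append(row)
--         elif in_table:
--             tables.append(current_table)
--             current_table = []
--             in_table = False
--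
--     if current_table:
--         tables.append(current_table)
--
--     return tables
-- ===== SOURCE B (Python) =====
-- from typing import Any, Dict, List, Optional, Union, Callable
--
-- def _extract_tables(content: str) -> List[List[List[str]]]:
--     """Extract tables: find maximal runs of pipe-containing lines with two pointers."""
--     lines = content.split('\n')
--     n = len(lines)
--     tables = []
--     i = 0
--     while i < n:
--         if '|' in lines[i]:
--             j = i
--             while j < n and '|' in lines[j]:
--                 j += 1
--             tables.append([[cell.strip() for cell in line.split('|')[1:-1]]
--                            for line in lines[i:j]])
--             i = j
--         else:
--             i += 1
--     return tables
-- ===== Notes on version B (the rewrite author's own statement) =====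
-- stated objective: alternative
-- what changed: Replaces A's in_table flag / current_table accumulator state machine with a two-pointer scan that finds each maximal run of pipe-containing lines and maps it to a table in one comprehension, eliminating both flush points.
import Mathlib
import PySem

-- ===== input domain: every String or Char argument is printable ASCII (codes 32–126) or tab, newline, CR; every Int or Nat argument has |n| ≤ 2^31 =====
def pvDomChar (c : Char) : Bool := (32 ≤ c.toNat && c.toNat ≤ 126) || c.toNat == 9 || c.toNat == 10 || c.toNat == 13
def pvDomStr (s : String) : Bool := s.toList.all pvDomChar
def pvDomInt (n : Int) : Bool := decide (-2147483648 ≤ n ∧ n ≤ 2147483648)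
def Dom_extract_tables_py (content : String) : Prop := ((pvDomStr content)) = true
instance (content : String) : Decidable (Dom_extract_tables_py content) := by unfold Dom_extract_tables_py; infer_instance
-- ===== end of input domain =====

-- B replaces A's in_table flag/flush state machine by a two-pointer scan over maximal
-- runs of pipe-containing lines (objective: alternative decomposition, same cost).

-- ===== PORT A =====
-- s.split(sep) for a NONEMPTY literal sep: split? is none only for sep = "", so getD is exact here
def pvSplit (s sep : String) : List String := (PySem.Str.split? s sep).getD []

-- '|' in line
def pvPipe (line : String) : Bool := PySem.Str.isIn "|" line

-- [cell.strip() for cell in line.split('|')[1:-1]]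
def pvRow (line : String) : List String :=
  (PySem.List.slice (pvSplit line "|") (some 1) (some (-1))).map PySem.Str.strip

-- the for-loop over lines with state (tables, current_table, in_table), then the final flush
def pvLoopA : List String → List (List (List String)) → List (List String) → Bool →
    List (List (List String))
  | [], tables, current, _ => if current.isEmpty then tables else tables ++ [current]
  | l :: rest, tables, current, in_table =>
    if pvPipe l then pvLoopA rest tables (current ++ [pvRow l]) true
    else if in_table then pvLoopA rest (tables ++ [current]) [] false
    else pvLoopA rest tables current in_table

def extract_tables_py (content : String) : List (List (List String)) :=
  pvLoopA (pvSplit content "\n") [] [] false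

-- ===== PORT B =====
-- the outer while: skip a non-pipe line, or take the maximal pipe-run lines[i:j] as one table
def pvGoB (lines : List String) : List (List (List String)) :=
  match lines with
  | [] => []
  | l :: rest =>
    if pvPipe l then
      ((l :: rest).takeWhile pvPipe).map pvRow :: pvGoB ((l :: rest).dropWhile pvPipe)
    else pvGoB rest
termination_by lines.length
decreasing_by
  · simp only [List.dropWhile_cons, *]
    exact Nat.lt_succ_of_le (List.length_dropWhile_le pvPipe rest)
  · simp

def extract_tables_py_alt (content : String) : List (List (List String)) :=
  pvGoB (pvSplit content "\n")

-- ===== PRECONDITION & SPEC =====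
def Spec_extract_tables_py (content : String) (out : List (List (List String))) : Prop := out = extract_tables_py_alt content
instance (content : String) (out : List (List (List String))) : Decidable (Spec_extract_tables_py content out) := by unfold Spec_extract_tables_py; infer_instance

-- ===== CLAIM (what is proved, stated in full; the proofs are below) =====
def Claim_equal_extract_tables_py : Prop := ∀ (content : String), Dom_extract_tables_py content → Spec_extract_tables_py content (extract_tables_py content)

-- ===== LEMMAS AND PROOFS =====

theorem pvGoB_cons_pos (l : String) (rest : List String) (h : pvPipe l = true) :
    pvGoB (l :: rest) =
      ((l :: rest).takeWhile pvPipe).map pvRow :: pvGoB ((l :: rest).dropWhile pvPipe) := by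
  rw [pvGoB]; simp [h]

theorem pvGoB_cons_neg (l : String) (rest : List String) (h : pvPipe l = false) :
    pvGoB (l :: rest) = pvGoB rest := by
  rw [pvGoB]; simp [h]

-- Joint loop invariant: outside a table (current = [], in_table = false) A's loop emits
-- tables ++ B's answer; inside a table (in_table = true, current ≠ []) it finishes the
-- current run and continues as B does.
theorem pvLoopA_eq (lines : List String) :
    (∀ tables, pvLoopA lines tables [] false = tables ++ pvGoB lines) ∧
    (∀ tables cur, cur ≠ [] →
      pvLoopA lines tables cur true =
        tables ++ ((cur ++ (lines.takeWhile pvPipe).map pvRow) :: pvGoB (lines.dropWhile pvPipe))) := by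
  induction lines with
  | nil =>
    constructor
    · intro tables; simp [pvLoopA, pvGoB]
    · intro tables cur hcur
      simp [pvLoopA, pvGoB, List.isEmpty_iff, hcur]
  | cons l rest ih =>
    obtain ⟨ih0, ih1⟩ := ih
    constructor
    · intro tables
      by_cases hp : pvPipe l
      · rw [pvGoB_cons_pos l rest hp]
        simp only [pvLoopA, hp, if_pos, List.takeWhile_cons, List.dropWhile_cons,
          List.nil_append]
        rw [ih1 tables [pvRow l] (by simp)]
        simp
      · simp only [pvLoopA, hp, Bool.false_eq_true, if_false]
        rw [ih0 tables, pvGoB_cons_neg l rest (by simpa using hp)]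
    · intro tables cur hcur
      by_cases hp : pvPipe l
      · simp only [pvLoopA, hp, if_pos, List.takeWhile_cons, List.dropWhile_cons]
        rw [ih1 tables (cur ++ [pvRow l]) (by simp)]
        simp
      · simp only [pvLoopA, hp, Bool.false_eq_true, if_false, if_true]
        rw [ih0 (tables ++ [cur])]
        simp [hp,
          pvGoB_cons_neg l rest (by simpa using hp)]

-- ===== VERDICT (by name: the statement is the Claim_ definition above) =====
theorem extract_tables_py_spec : Claim_equal_extract_tables_py := by
  intro content _
  unfold Spec_extract_tables_py extract_tables_py extract_tables_py_alt
  exact ((pvLoopA_eq _).1 []).trans (by simp)
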